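-- pv_equiv track=rewrite | github.com/ycu-iil/MODAN | peptide_handler.py | peptide_feature2AA_seq
-- ===== SOURCE A (Python) =====
-- def peptide_feature2AA_seq(pf, AA_keys, ct_list, nt_list):
--     aa_seq = ''
--
--     for j, k in enumerate(pf[4:]):
--         if j in pf[2:4]:
--             aa_seq += '='
--         aa_seq += AA_keys[k]
--
--     seq = ct_list[pf[0]] + '-' + aa_seq + '-' + nt_list[pf[1]]
--     return seq
-- ===== SOURCE B (Python) =====
-- def peptide_feature2AA_seq(pf, AA_keys, ct_list, nt_list):
--     chars = [AA_keys[k] for k in pf[4:]]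
--     cuts = sorted({p for p in pf[2:4] if 0 <= p < len(chars)})
--     segs = []
--     prev = 0
--     for c in cuts:
--         segs.append(''.join(chars[prev:c]))
--         prev = c
--     segs.append(''.join(chars[prev:]))
--     return ct_list[pf[0]] + '-' + '='.join(segs) + '-' + nt_list[pf[1]]
-- ===== Notes on version B (the rewrite author's own statement) =====
-- stated objective: alternative
-- what changed: Instead of A's per-index loop that tests each position against pf[2:4] and appends '=' marks on the fly, B builds the residue-string list once, computes the sorted set of in-range cut points from pf[2:4], slices the list at those points and joins the segments with '='.
import Mathlib
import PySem

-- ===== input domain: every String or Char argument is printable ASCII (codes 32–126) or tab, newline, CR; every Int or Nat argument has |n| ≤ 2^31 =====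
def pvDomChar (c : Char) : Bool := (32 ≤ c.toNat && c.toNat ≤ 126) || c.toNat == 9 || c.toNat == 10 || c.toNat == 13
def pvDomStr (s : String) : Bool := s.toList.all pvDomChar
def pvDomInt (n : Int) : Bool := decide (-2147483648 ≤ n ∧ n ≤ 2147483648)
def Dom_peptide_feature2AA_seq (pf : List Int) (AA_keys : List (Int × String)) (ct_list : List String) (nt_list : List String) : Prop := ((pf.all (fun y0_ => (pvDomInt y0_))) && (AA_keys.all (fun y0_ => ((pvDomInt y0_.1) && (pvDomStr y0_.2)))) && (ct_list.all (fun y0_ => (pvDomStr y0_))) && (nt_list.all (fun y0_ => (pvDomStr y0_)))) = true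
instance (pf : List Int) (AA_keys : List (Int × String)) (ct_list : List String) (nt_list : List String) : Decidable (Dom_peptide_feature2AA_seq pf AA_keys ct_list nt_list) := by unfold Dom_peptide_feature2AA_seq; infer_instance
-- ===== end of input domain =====

-- B replaces A's per-index membership scan with a slice-and-join decomposition (build the residue list once,
-- compute the sorted in-range cut points, join the slices with '='); objective: alternative decomposition, same cost.
-- Strings are handled on the List Char side (exact: Python str concatenation is append of code-point lists).

-- ===== PORT A =====
def peptide_feature2AA_seq (pf : List Int) (AA_keys : List (Int × String)) (ct_list : List String) (nt_list : List String) : String :=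
  -- aa_seq accumulated over enumerate(pf[4:]); AA_keys[k] is a dict lookup (KeyError excluded by Pre_, default unreachable there)
  let aa_seq : List Char :=
    (PySem.List.enumerate (PySem.List.slice pf (some 4) none)).foldl
      (fun acc jk =>
        (if (PySem.List.slice pf (some 2) (some 4)).contains jk.1 then acc ++ ['='] else acc)
          ++ ((List.lookup jk.2 AA_keys).getD "").toList)
      []
  String.ofList ((PySem.List.pyGetD ct_list (PySem.List.pyGetD pf 0 0) "").toList
    ++ '-' :: aa_seq ++ '-' :: (PySem.List.pyGetD nt_list (PySem.List.pyGetD pf 1 0) "").toList)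

-- ===== PORT B =====
def peptide_feature2AA_seq_alt (pf : List Int) (AA_keys : List (Int × String)) (ct_list : List String) (nt_list : List String) : String :=
  let chars : List String := (PySem.List.slice pf (some 4) none).map (fun k => (List.lookup k AA_keys).getD "")
  let cuts : List Int :=
    PySem.List.sorted
      (PySem.Set.ofList ((PySem.List.slice pf (some 2) (some 4)).filter
        (fun p => decide (0 ≤ p) && decide (p < (chars.length : Int)))))
      (fun x => x) false
  let st := cuts.foldl
    (fun (sp : List (List Char) × Int) c =>
      (sp.1 ++ [(PySem.List.slice chars (some sp.2) (some c)).flatMap String.toList], c))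
    ([], 0)
  let segs := st.1 ++ [(PySem.List.slice chars (some st.2) none).flatMap String.toList]
  String.ofList ((PySem.List.pyGetD ct_list (PySem.List.pyGetD pf 0 0) "").toList
    ++ '-' :: PySem.Chars.join ['='] segs ++ '-' :: (PySem.List.pyGetD nt_list (PySem.List.pyGetD pf 1 0) "").toList)

-- ===== PRECONDITION & SPEC =====
-- Pre_ excludes exactly the inputs where the Python A raises: pf too short (IndexError on pf[0]/pf[1]),
-- ct_list/nt_list index out of range (IndexError), or a residue code of pf[4:] missing from AA_keys (KeyError).
def Pre_peptide_feature2AA_seq (pf : List Int) (AA_keys : List (Int × String)) (ct_list : List String) (nt_list : List String) : Prop :=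
  2 ≤ pf.length ∧
  PySem.Raise.InRange ct_list.length (PySem.List.pyGetD pf 0 0) ∧
  PySem.Raise.InRange nt_list.length (PySem.List.pyGetD pf 1 0) ∧
  ∀ k ∈ pf.drop 4, (List.lookup k AA_keys).isSome = true
instance (pf : List Int) (AA_keys : List (Int × String)) (ct_list : List String) (nt_list : List String) : Decidable (Pre_peptide_feature2AA_seq pf AA_keys ct_list nt_list) := by unfold Pre_peptide_feature2AA_seq; infer_instance

def pvWitness_peptide_feature2AA_seq : List Int × (List (Int × String)) × List String × List String :=
  ([0, 0, 1, 2, 5, 6, 5], [(5, "A"), (6, "G")], ["Ac"], ["NH2"])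

def Spec_peptide_feature2AA_seq (pf : List Int) (AA_keys : List (Int × String)) (ct_list : List String) (nt_list : List String) (out : String) : Prop := out = peptide_feature2AA_seq_alt pf AA_keys ct_list nt_list
instance (pf : List Int) (AA_keys : List (Int × String)) (ct_list : List String) (nt_list : List String) (out : String) : Decidable (Spec_peptide_feature2AA_seq pf AA_keys ct_list nt_list out) := by unfold Spec_peptide_feature2AA_seq; infer_instance

-- ===== CLAIM (what is proved, stated in full; the proofs are below) =====
def Claim_equal_peptide_feature2AA_seq : Prop := ∀ (pf : List Int) (AA_keys : List (Int × String)) (ct_list : List String) (nt_list : List String), Dom_peptide_feature2AA_seq pf AA_keys ct_list nt_list → Pre_peptide_feature2AA_seq pf AA_keys ct_list nt_list → Spec_peptide_feature2AA_seq pf AA_keys ct_list nt_list (peptide_feature2AA_seq pf AA_keys ct_list nt_list)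

-- ===== LEMMAS AND PROOFS =====

-- A's loop, abstracted: emit '=' before index j when j ∈ S, then the j-th residue string.
def markFrom (cs : List String) (j : Int) (S : List Int) : List Char :=
  match cs with
  | [] => []
  | c :: t => (if S.contains j then ['='] else []) ++ (c.toList ++ markFrom t (j + 1) S)

-- B's result, abstracted: slices joined by '=' at the (sorted, in-range) cut points.
def segJoin (cs : List String) (j : Int) (cuts : List Int) : List Char :=
  match cuts with
  | [] => cs.flatMap String.toList
  | c :: rest => ((cs.take (c - j).toNat).flatMap String.toList) ++ '=' :: segJoin (cs.drop (c - j).toNat) c rest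

theorem markFrom_congr (cs : List String) (j : Int) (S T : List Int)
    (h : ∀ i : Int, j ≤ i → i < j + cs.length → (i ∈ S ↔ i ∈ T)) :
    markFrom cs j S = markFrom cs j T := by
  induction cs generalizing j with
  | nil => rfl
  | cons c t ih =>
    simp only [markFrom, List.length_cons] at *
    have hj : (j ∈ S) ↔ (j ∈ T) := h j le_rfl (by push_cast; omega)
    have := ih (j + 1) (fun i h1 h2 => h i (by omega) (by push_cast at *; omega))
    simp [hj, this]

theorem markFrom_no (cs : List String) (j : Int) (S : List Int)
    (h : ∀ i : Int, j ≤ i → i < j + cs.length → i ∉ S) :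
    markFrom cs j S = cs.flatMap String.toList := by
  induction cs generalizing j with
  | nil => rfl
  | cons c t ih =>
    simp only [markFrom, List.length_cons] at *
    have hj : j ∉ S := h j le_rfl (by push_cast; omega)
    have := ih (j + 1) (fun i h1 h2 => h i (by omega) (by push_cast at *; omega))
    simp [hj, this]

theorem markFrom_split (a : Nat) (cs : List String) (j : Int) (S : List Int) :
    markFrom cs j S = markFrom (cs.take a) j S ++ markFrom (cs.drop a) (j + a) S := by
  induction cs generalizing a j with
  | nil => simp [markFrom]
  | cons c t ih =>
    cases a with
    | zero => simp [markFrom]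
    | succ a' =>
      simp only [List.take_succ_cons, List.drop_succ_cons, markFrom]
      rw [ih a' (j + 1)]
      have : j + 1 + (a' : Int) = j + ((a' : Nat) + 1 : Nat) := by push_cast; omega
      rw [this]
      simp

theorem markFrom_eq_segJoin (cuts : List Int) : ∀ (cs : List String) (j : Int) (S : List Int),
    cuts.Pairwise (· < ·) →
    (∀ q ∈ cuts, j ≤ q ∧ q < j + cs.length) →
    (∀ i : Int, j ≤ i → i < j + cs.length → (i ∈ S ↔ i ∈ cuts)) →
    markFrom cs j S = segJoin cs j cuts := by
  induction cuts with
  | nil =>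
    intro cs j S _ _ hmem
    exact markFrom_no cs j S (fun i h1 h2 => by simpa using (hmem i h1 h2).mp)
  | cons c rest ih =>
    intro cs j S hpw hbd hmem
    have hrest : ∀ q ∈ rest, c < q := by
      intro q hq; exact (List.pairwise_cons.mp hpw).1 q hq
    have hcb := hbd c (by simp)
    have ha : ((c - j).toNat : Int) = c - j := Int.toNat_of_nonneg (by omega)
    set a : Nat := (c - j).toNat with hadef
    have haln : a < cs.length := by omega
    rw [markFrom_split a cs j S]
    have hja : j + (a : Int) = c := by omega
    -- first segment: no marks in [j, c)
    have h1 : markFrom (cs.take a) j S = (cs.take a).flatMap String.toList := by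
      apply markFrom_no
      intro i hi1 hi2 hiS
      have hilen : i < j + a := by
        have := List.length_take_le a cs
        simp only [List.length_take] at hi2
        push_cast at hi2 ⊢; omega
      have : i ∈ c :: rest := (hmem i hi1 (by omega)).mp hiS
      rcases List.mem_cons.mp this with h | h
      · omega
      · exact absurd (hrest i h) (by omega)
    -- second segment starts at index c, which is marked
    obtain ⟨h, t, hdrop⟩ : ∃ h t, cs.drop a = h :: t := by
      cases hd : cs.drop a with
      | nil => exact absurd (List.drop_eq_nil_iff.mp hd) (by omega)
      | cons h t => exact ⟨h, t, rfl⟩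
    have hlen_t : (t.length : Int) = cs.length - a - 1 := by
      have := congrArg List.length hdrop
      simp only [List.length_drop, List.length_cons] at this
      omega
    have hcS : c ∈ S := by
      refine (hmem c (by omega) (by omega)).mpr (by simp)
    set Sf : List Int := S.filter (fun x => decide (x ≠ c)) with hSf
    have hmemSf : ∀ i : Int, i ∈ Sf ↔ i ∈ S ∧ i ≠ c := by
      intro i; simp [hSf]
    have h2 : markFrom (cs.drop a) (j + a) S = '=' :: markFrom (h :: t) c Sf := by
      rw [hdrop, hja]
      have hc1 : markFrom t (c + 1) S = markFrom t (c + 1) Sf := by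
        apply markFrom_congr
        intro i hi1 hi2
        rw [hmemSf]
        constructor
        · intro hiS; exact ⟨hiS, by omega⟩
        · exact fun h => h.1
      simp only [markFrom, List.contains_iff_mem, hcS, if_pos, hmemSf]
      simp [hc1]
    have h3 : markFrom (h :: t) c Sf = segJoin (h :: t) c rest := by
      apply ih (h :: t) c Sf (List.pairwise_cons.mp hpw).2
      · intro q hq
        have := hbd q (by simp [hq])
        have := hrest q hq
        simp only [List.length_cons]
        omega
      · intro i hi1 hi2
        rw [hmemSf]
        simp only [List.length_cons] at hi2
        have hiS : i ∈ S ↔ i ∈ c :: rest := hmem i (by omega) (by push_cast at *; omega)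
        constructor
        · rintro ⟨his, hne⟩
          rcases List.mem_cons.mp (hiS.mp his) with h | h
          · exact absurd h hne
          · exact h
        · intro hir
          exact ⟨hiS.mpr (List.mem_cons_of_mem _ hir), by have := hrest i hir; omega⟩
    rw [h1, h2, h3]
    show _ = segJoin cs j (c :: rest)
    simp only [segJoin, ← hadef, hdrop]

-- B's fold over the cut list, in closed form.
def segsList (cs : List String) (prev : Int) (cuts : List Int) : List (List Char) :=
  match cuts with
  | [] => []
  | c :: rest => (PySem.List.slice cs (some prev) (some c)).flatMap String.toList :: segsList cs c rest

def lastP (prev : Int) (cuts : List Int) : Int :=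
  match cuts with
  | [] => prev
  | c :: rest => lastP c rest

theorem fold_eq_segsList (cuts : List Int) : ∀ (cs : List String) (segs : List (List Char)) (prev : Int),
    cuts.foldl
      (fun (sp : List (List Char) × Int) c =>
        (sp.1 ++ [(PySem.List.slice cs (some sp.2) (some c)).flatMap String.toList], c))
      (segs, prev)
    = (segs ++ segsList cs prev cuts, lastP prev cuts) := by
  induction cuts with
  | nil => intro cs segs prev; simp [segsList, lastP]
  | cons c rest ih =>
    intro cs segs prev
    simp only [List.foldl_cons, segsList, lastP, ih]
    simp

theorem join_segsList (cuts : List Int) : ∀ (cs : List String) (prev : Int),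
    0 ≤ prev → (∀ q ∈ cuts, prev ≤ q) → cuts.Pairwise (· < ·) →
    PySem.Chars.join ['=']
      (segsList cs prev cuts ++ [(PySem.List.slice cs (some (lastP prev cuts)) none).flatMap String.toList])
    = segJoin (cs.drop prev.toNat) prev cuts := by
  induction cuts with
  | nil =>
    intro cs prev h0 _ _
    simp [segsList, lastP, segJoin, PySem.Chars.join_singleton, PySem.List.slice_from _ h0]
  | cons c rest ih =>
    intro cs prev h0 hge hpw
    have hpc : prev ≤ c := hge c (by simp)
    have h0c : 0 ≤ c := by omega
    have hrest : ∀ q ∈ rest, c ≤ q := by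
      intro q hq; exact le_of_lt ((List.pairwise_cons.mp hpw).1 q hq)
    simp only [segsList, lastP, List.cons_append]
    obtain ⟨b, l, hbl⟩ : ∃ b l, segsList cs c rest ++ [(PySem.List.slice cs (some (lastP c rest)) none).flatMap String.toList] = b :: l := by
      cases hsl : segsList cs c rest with
      | nil => exact ⟨_, _, rfl⟩
      | cons x xs => exact ⟨_, _, rfl⟩
    rw [hbl, PySem.Chars.join_cons_cons, ← hbl,
      ih cs c h0c hrest (List.pairwise_cons.mp hpw).2]
    show _ ++ ['='] ++ _ = segJoin (cs.drop prev.toNat) prev (c :: rest)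
    simp only [segJoin]
    rw [PySem.List.slice_toNat cs h0 h0c]
    have e1 : (c - prev).toNat = c.toNat - prev.toNat := by omega
    have e2 : (cs.drop prev.toNat).drop (c.toNat - prev.toNat) = cs.drop c.toNat := by
      rw [List.drop_drop]
      congr 1
      omega
    rw [e1, e2, List.take_drop]
    have e3 : prev.toNat + (c.toNat - prev.toNat) = c.toNat := by omega
    rw [e3]
    simp [List.append_assoc]

-- A's enumerate-fold is markFrom of the residue list.
theorem foldA_eq_markFrom (S : List Int) (f : Int → String) :
    ∀ (tail : List Int) (s : Int) (acc : List Char),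
    (PySem.List.enumerate tail s).foldl
      (fun acc jk => (if S.contains jk.1 then acc ++ ['='] else acc) ++ (f jk.2).toList) acc
    = acc ++ markFrom (tail.map f) s S := by
  intro tail
  induction tail with
  | nil => intro s acc; simp [PySem.List.enumerate_nil, markFrom]
  | cons x t ih =>
    intro s acc
    rw [PySem.List.enumerate_cons, List.foldl_cons, ih]
    simp only [List.map_cons, markFrom]
    by_cases hs : s ∈ S <;> simp [hs]

-- ===== VERDICT (by name: the statement is the Claim_ definition above) =====
theorem peptide_feature2AA_seq_spec : Claim_equal_peptide_feature2AA_seq := by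
  intro pf AA_keys ct_list nt_list _ _
  unfold Spec_peptide_feature2AA_seq peptide_feature2AA_seq peptide_feature2AA_seq_alt
  simp only []
  congr 1
  set f : Int → String := fun k => (List.lookup k AA_keys).getD "" with hf
  set chars : List String := (PySem.List.slice pf (some 4) none).map f with hchars
  set S : List Int := PySem.List.slice pf (some 2) (some 4) with hS
  set cuts : List Int :=
    PySem.List.sorted
      (PySem.Set.ofList (S.filter (fun p => decide (0 ≤ p) && decide (p < (chars.length : Int)))))
      (fun x => x) false with hcuts
  have hpw : cuts.Pairwise (· < ·) := PySem.List.sorted_ofList_pairwise_lt _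
  have hmemc : ∀ q : Int, q ∈ cuts ↔ q ∈ S ∧ 0 ≤ q ∧ q < (chars.length : Int) := by
    intro q
    rw [hcuts, PySem.List.mem_sorted, PySem.Set.mem_ofList, List.mem_filter]
    simp
  congr 1
  rw [foldA_eq_markFrom S f (PySem.List.slice pf (some 4) none) 0 [], List.nil_append, ← hchars]
  rw [fold_eq_segsList cuts chars [] 0, List.nil_append]
  rw [markFrom_eq_segJoin cuts chars 0 S hpw
    (fun q hq => by have := (hmemc q).mp hq; omega)
    (fun i h1 h2 => by
      rw [hmemc i]
      constructor
      · intro hiS; exact ⟨hiS, h1, by push_cast at *; omega⟩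
      · exact fun h => h.1)]
  rw [join_segsList cuts chars 0 le_rfl
    (fun q hq => ((hmemc q).mp hq).2.1) hpw]
  simp
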